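-- pv_equiv track=rewrite | github.com/mayank-17/Practice-Programs | Python/c2.py | simplestSum
-- ===== SOURCE A (Python) =====
-- def simplestSum(k, a, b):
--     sum2=0
--     for i in range(a,b+1):
--         j=1
--         sum1=0
--         while j<=i:
--             sum1=sum1+j
--             j=j*k
--             j+=1
--         sum2=sum2+sum1
--     return sum2%(10**9 + 7)
-- ===== SOURCE B (Python) =====
-- def simplestSum(k, a, b):
--     # Swap the order of summation: walk the chain t0=1, t_{n+1}=t_n*k+1 once.
--     # A's inner loop adds term t_n for exactly those i with i >= max(t_0..t_n),
--     # so each term t contributes t * (b - max(a, m) + 1), m the running max.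
--     total = 0
--     if a <= b:
--         t = 1
--         m = 1
--         while m <= b:
--             lo = a if a > m else m
--             total += t * (b - lo + 1)
--             t = t * k + 1
--             if t > m:
--                 m = t
--     return total % (10**9 + 7)
-- ===== Notes on version B (the rewrite author's own statement) =====
-- stated objective: faster
-- what changed: Instead of re-walking the chain t0=1, t_{n+1}=t_n*k+1 for every i in [a,b] (nested loops), B walks the chain once keeping its running maximum m and adds each term t times the count of i in [a,b] with i >= m, i.e. t*(b-max(a,m)+1).
import Mathlib
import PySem

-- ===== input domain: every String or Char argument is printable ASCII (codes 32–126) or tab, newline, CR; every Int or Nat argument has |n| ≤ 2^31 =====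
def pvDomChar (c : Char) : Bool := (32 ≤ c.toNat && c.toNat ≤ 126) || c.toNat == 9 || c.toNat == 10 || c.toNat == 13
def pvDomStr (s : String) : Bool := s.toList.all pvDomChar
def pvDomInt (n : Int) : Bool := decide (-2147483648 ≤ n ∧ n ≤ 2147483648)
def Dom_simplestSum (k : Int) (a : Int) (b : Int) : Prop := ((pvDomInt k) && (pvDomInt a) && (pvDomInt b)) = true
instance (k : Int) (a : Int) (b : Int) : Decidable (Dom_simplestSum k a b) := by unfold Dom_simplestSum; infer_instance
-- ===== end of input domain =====

-- B walks the chain 1, k+1, (k+1)k+1, ... once, keeping its running maximum m, and adds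
-- each term t times the number of i in [a,b] with i ≥ m, instead of re-walking the chain
-- for every i. Pre_ excludes only the inputs (k ∈ {0,-1} with some i ≥ 1 in the range)
-- on which A's inner while loop never terminates.


-- ===== PORT A =====
-- inner while loop of A: while j<=i: sum1+=j; j=j*k; j+=1   (fueled; on Pre_ the
-- fuel 2*i.toNat+3 passed below is proved sufficient, see innerLoop_fuel)
def innerLoop : Nat → Int → Int → Int → Int → Int
  | 0, _, _, _, s => s
  | f+1, j, k, i, s => if j ≤ i then innerLoop f (j*k+1) k i (s+j) else s

def simplestSum (k : Int) (a : Int) (b : Int) : Int :=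
  ((PySem.List.pyRange a (b+1) 1).foldl
      (fun sum2 i => sum2 + innerLoop (2*i.toNat+3) 1 k i 0) 0) % (10^9 + 7)

-- ===== PORT B =====
-- B's while loop: while m<=b: total += t*(b - max(a,m) + 1); t = t*k+1; m = max(m,t)
def altLoop : Nat → Int → Int → Int → Int → Int → Int → Int
  | 0, _, _, _, _, _, tot => tot
  | f+1, t, m, k, a, b, tot =>
      if m ≤ b then
        altLoop f (t*k+1) (if t*k+1 > m then t*k+1 else m) k a b
          (tot + t*(b - (if a > m then a else m) + 1))
      else tot

def simplestSum_alt (k : Int) (a : Int) (b : Int) : Int :=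
  (if a ≤ b then altLoop (2*b.toNat+3) 1 1 k a b 0 else 0) % (10^9 + 7)

-- ===== PRECONDITION & SPEC =====
-- Pre_ excludes exactly the inputs on which A never returns: for k = 0 or k = -1 with
-- some i ≥ 1 in range(a, b+1) the chain cycles (1,1,1,... resp. 1,0,1,0,...) below i,
-- so A's inner while loop runs forever.
def Pre_simplestSum (k : Int) (a : Int) (b : Int) : Prop :=
  (1 ≤ k ∨ k ≤ -2) ∨ b ≤ 0 ∨ b < a
instance (k : Int) (a : Int) (b : Int) : Decidable (Pre_simplestSum k a b) := by
  unfold Pre_simplestSum; infer_instance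
def pvWitness_simplestSum : Int × Int × Int := (2, 1, 10)

def Spec_simplestSum (k : Int) (a : Int) (b : Int) (out : Int) : Prop := out = simplestSum_alt k a b
instance (k : Int) (a : Int) (b : Int) (out : Int) : Decidable (Spec_simplestSum k a b out) := by unfold Spec_simplestSum; infer_instance

-- ===== CLAIM (what is proved, stated in full; the proofs are below) =====
def Claim_equal_simplestSum : Prop := ∀ (k : Int) (a : Int) (b : Int), Dom_simplestSum k a b → Pre_simplestSum k a b → Spec_simplestSum k a b (simplestSum k a b)

-- ===== LEMMAS AND PROOFS =====

-- accumulator of innerLoop is additive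
theorem innerLoop_acc (f : Nat) (k i : Int) : ∀ j s, innerLoop f j k i s = s + innerLoop f j k i 0 := by
  induction f with
  | zero => intro j s; simp [innerLoop]
  | succ f ih =>
      intro j s
      by_cases h : j ≤ i
      · simp only [innerLoop, if_pos h]
        rw [ih (j*k+1) (s+j), ih (j*k+1) (0+j)]
        ring
      · simp [innerLoop, h]

-- when j > i the loop exits at once, any fuel
theorem innerLoop_stop (f : Nat) (j k i s : Int) (h : i < j) : innerLoop f j k i s = s := by
  cases f with
  | zero => rfl
  | succ f => simp [innerLoop, not_le.mpr h]

theorem innerLoop_succ (f : Nat) (j k i s : Int) :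
    innerLoop (f+1) j k i s = if j ≤ i then innerLoop f (j*k+1) k i (s+j) else s := rfl

-- termination measure of A's inner loop: for k ≤ -2 a negative j recovers to the
-- positive j*k+1 in one step, so we measure by the next positive value
def imeasure (k i j : Int) : Nat :=
  2*(i - (if 1 ≤ j then j else j*k+1) + 1).toNat + (if 1 ≤ j then 0 else 1)

theorem imeasure_step (k i j : Int) (hK : 1 ≤ k ∨ k ≤ -2) (hG : 1 ≤ j ∨ k ≤ -2)
    (h : j ≤ i) : imeasure k i (j*k+1) < imeasure k i j := by
  by_cases hj : 1 ≤ j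
  · rcases hK with hk | hk
    · have h1 : j + 1 ≤ j*k+1 := by nlinarith
      have h2 : (1:Int) ≤ j*k+1 := by omega
      simp only [imeasure, if_pos hj, if_pos h2]
      omega
    · have h1 : j*k+1 ≤ -1 := by nlinarith
      have h2 : ¬ (1:Int) ≤ j*k+1 := by omega
      have h3 : j + 2 ≤ (j*k+1)*k+1 := by nlinarith [mul_nonneg (show (0:Int) ≤ 1-k by omega) (show (0:Int) ≤ -(j*(k+1)+1) by nlinarith)]
      simp only [imeasure, if_pos hj, if_neg h2]
      omega
  · have hk : k ≤ -2 := by tauto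
    have h1 : (0:Int) ≤ j*k := by nlinarith
    have h2 : (1:Int) ≤ j*k+1 := by omega
    simp only [imeasure, if_neg hj, if_pos h2]
    omega

theorem good_step (k j : Int) (hK : 1 ≤ k ∨ k ≤ -2) (hG : 1 ≤ j ∨ k ≤ -2) :
    1 ≤ j*k+1 ∨ k ≤ -2 := by
  rcases hK with hk | hk
  · rcases hG with hj | hj
    · left; nlinarith
    · omega
  · right; exact hk

-- fuel irrelevance: any two fuels above the measure give the same value
theorem innerLoop_fuel (k i : Int) (hK : 1 ≤ k ∨ k ≤ -2) :
    ∀ (N : Nat), ∀ (j s : Int) (f g : Nat), (1 ≤ j ∨ k ≤ -2) → imeasure k i j = N →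
      N < f → N < g → innerLoop f j k i s = innerLoop g j k i s := by
  intro N
  induction N using Nat.strong_induction_on with
  | _ N ih =>
      intro j s f g hG hN hf hg
      by_cases h : j ≤ i
      · obtain ⟨f', rfl⟩ : ∃ f', f = f' + 1 := ⟨f - 1, by omega⟩
        obtain ⟨g', rfl⟩ : ∃ g', g = g' + 1 := ⟨g - 1, by omega⟩
        simp only [innerLoop, if_pos h]
        have hs := imeasure_step k i j hK hG h
        exact ih (imeasure k i (j*k+1)) (by omega) (j*k+1) (s+j) f' g'
          (good_step k j hK hG) rfl (by omega) (by omega)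
      · push_neg at h
        rw [innerLoop_stop _ _ _ _ _ h, innerLoop_stop _ _ _ _ _ h]

-- canonical value of A's inner loop from state j
def cInner (k i j : Int) : Int := innerLoop (imeasure k i j + 1) j k i 0

theorem cInner_stop (k i j : Int) (h : i < j) : cInner k i j = 0 :=
  innerLoop_stop _ _ _ _ _ h

-- contribution of the chain from state (t, m) to the term for i (m = running max so far)
def Hfun (k t m i : Int) : Int := if m ≤ i then cInner k i t else 0

-- the B-loop invariant: m ≥ 1 and t is either the running max itself (positive phase)
-- or the successor m*k+1 of the running max (negative phase, k ≤ -2)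
theorem step_inv (k t m : Int) (hK : 1 ≤ k ∨ k ≤ -2) (hm : 1 ≤ m)
    (hd : t = m ∨ (k ≤ -2 ∧ t = m*k+1)) :
    1 ≤ (if t*k+1 > m then t*k+1 else m)
    ∧ (t*k+1 = (if t*k+1 > m then t*k+1 else m)
        ∨ (k ≤ -2 ∧ t*k+1 = (if t*k+1 > m then t*k+1 else m)*k+1))
    ∧ m ≤ (if t*k+1 > m then t*k+1 else m) := by
  rcases hd with rfl | ⟨hk, rfl⟩
  · rcases hK with hk | hk
    · have h1 : t + 1 ≤ t*k+1 := by nlinarith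
      rw [if_pos (by omega)]
      exact ⟨by omega, Or.inl rfl, by omega⟩
    · have h1 : t*k+1 ≤ -1 := by nlinarith
      rw [if_neg (by omega)]
      exact ⟨hm, Or.inr ⟨hk, rfl⟩, le_rfl⟩
  · have h3 : m + 2 ≤ (m*k+1)*k+1 := by nlinarith [mul_nonneg (show (0:Int) ≤ 1-k by omega) (show (0:Int) ≤ -(m*(k+1)+1) by nlinarith)]
    rw [if_pos (by omega)]
    exact ⟨by omega, Or.inl rfl, by omega⟩

-- termination measure of B's loop
def ameasure (b t m : Int) : Nat := 2*(b - m + 1).toNat + (if 1 ≤ t then 1 else 0)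

theorem step_measure (k t m b : Int) (hK : 1 ≤ k ∨ k ≤ -2) (hm : 1 ≤ m)
    (hd : t = m ∨ (k ≤ -2 ∧ t = m*k+1)) (hmb : m ≤ b) :
    ameasure b (t*k+1) (if t*k+1 > m then t*k+1 else m) < ameasure b t m := by
  rcases hd with rfl | ⟨hk, rfl⟩
  · rcases hK with hk | hk
    · have h1 : t + 1 ≤ t*k+1 := by nlinarith
      rw [if_pos (by omega)]
      simp only [ameasure, if_pos (show (1:Int) ≤ t by omega), if_pos (show (1:Int) ≤ t*k+1 by omega)]
      omega
    · have h1 : t*k+1 ≤ -1 := by nlinarith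
      rw [if_neg (by omega)]
      simp only [ameasure, if_pos (show (1:Int) ≤ t by omega), if_neg (show ¬ (1:Int) ≤ t*k+1 by omega)]
      omega
  · have h1 : m*k+1 ≤ -1 := by nlinarith
    have h3 : m + 2 ≤ (m*k+1)*k+1 := by nlinarith [mul_nonneg (show (0:Int) ≤ 1-k by omega) (show (0:Int) ≤ -(m*(k+1)+1) by nlinarith)]
    rw [if_pos (by omega)]
    simp only [ameasure, if_neg (show ¬ (1:Int) ≤ m*k+1 by omega), if_pos (show (1:Int) ≤ (m*k+1)*k+1 by omega)]
    omega

-- pointwise peel of one chain step out of Hfun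
theorem Hfun_peel (k t m i : Int) (hK : 1 ≤ k ∨ k ≤ -2) (hm : 1 ≤ m)
    (hd : t = m ∨ (k ≤ -2 ∧ t = m*k+1)) :
    Hfun k t m i = (if m ≤ i then t else 0)
      + Hfun k (t*k+1) (if t*k+1 > m then t*k+1 else m) i := by
  have htm : t ≤ m := by
    rcases hd with rfl | ⟨hk, rfl⟩
    · exact le_rfl
    · nlinarith
  have hG : 1 ≤ t ∨ k ≤ -2 := by
    rcases hd with rfl | ⟨hk, _⟩
    · left; exact hm
    · right; exact hk
  obtain ⟨hm1, _, hmm⟩ := step_inv k t m hK hm hd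
  by_cases hmi : m ≤ i
  · have hti : t ≤ i := le_trans htm hmi
    have hG' := good_step k t hK hG
    have hms := imeasure_step k i t hK hG hti
    have hL : cInner k i t = t + cInner k i (t*k+1) := by
      have e1 : cInner k i t = innerLoop (imeasure k i t) (t*k+1) k i (0+t) := by
        unfold cInner
        rw [innerLoop_succ, if_pos hti]
      rw [e1, innerLoop_acc,
          innerLoop_fuel k i hK (imeasure k i (t*k+1)) (t*k+1) 0 (imeasure k i t)
            (imeasure k i (t*k+1) + 1) hG' rfl (by omega) (by omega)]
      simp only [cInner]
      ring
    unfold Hfun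
    rw [if_pos hmi, if_pos hmi, hL]
    by_cases hmi' : (if t*k+1 > m then t*k+1 else m) ≤ i
    · rw [if_pos hmi']
    · rw [if_neg hmi']
      have hti' : i < t*k+1 := by
        by_cases hc : t*k+1 > m
        · rw [if_pos hc] at hmi'; omega
        · rw [if_neg hc] at hmi'; omega
      rw [cInner_stop k i _ hti']
  · unfold Hfun
    rw [if_neg hmi, if_neg hmi,
        if_neg (show ¬ (if t*k+1 > m then t*k+1 else m) ≤ i by omega)]
    ring

-- Σ_{i=a}^{a+n} (if m ≤ i then t else 0) = t * ((a+n) - max(a,m) + 1) when m ≤ a+n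
theorem contrib_aux (t m : Int) : ∀ (n : Nat) (a : Int), m ≤ a + n →
    ((PySem.List.pyRange a (a + n + 1) 1).map (fun i => if m ≤ i then t else 0)).sum
      = t * ((a + n) - (if a > m then a else m) + 1) := by
  intro n
  induction n with
  | zero =>
      intro a hm
      push_cast at hm ⊢
      rw [show a + (0:Int) + 1 = a + 1 by ring, PySem.List.pyRange_one_singleton]
      simp only [List.map_cons, List.map_nil, List.sum_cons, List.sum_nil,
        if_pos (show m ≤ a by omega), add_zero]
      by_cases ham : a > m
      · rw [if_pos ham]; ring
      · rw [if_neg ham]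
        have hma : m = a := by omega
        subst hma; ring
  | succ n ih =>
      intro a hm
      push_cast at hm ⊢
      rw [show a + ((n:Int)+1) + 1 = (a + (n:Int) + 1) + 1 by ring,
          PySem.List.pyRange_one_succ_right (show a ≤ a + (n:Int) + 1 by omega),
          List.map_append, List.sum_append]
      by_cases hmb : m ≤ a + (n:Int)
      · have h := ih a (by exact_mod_cast hmb)
        push_cast at h
        rw [h]
        simp only [List.map_cons, List.map_nil, List.sum_cons, List.sum_nil,
          if_pos (show m ≤ a + (n:Int) + 1 by omega), add_zero]
        by_cases ham : a > m
        · rw [if_pos ham]; ring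
        · rw [if_neg ham]; ring
      · have hma : m = a + (n:Int) + 1 := by omega
        have hz : ∀ i ∈ PySem.List.pyRange a (a + (n:Int) + 1) 1,
            (if m ≤ i then t else (0:Int)) = (fun _ => (0:Int)) i := by
          intro i hi
          rw [PySem.List.mem_pyRange_one] at hi
          simp only
          rw [if_neg (by omega)]
        rw [List.map_congr_left hz]
        have ham : ¬ a > m := by omega
        simp only [List.map_const', List.sum_replicate, smul_zero, List.map_cons,
          List.map_nil, List.sum_cons, List.sum_nil,
          if_pos (show m ≤ a + (n:Int) + 1 by omega), if_neg ham, add_zero, zero_add]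
        have h1 : a + ((n:Int)+1) - m + 1 = 1 := by omega
        rw [h1]; ring

theorem contrib_sum (t m a b : Int) (hab : a ≤ b) (hm : m ≤ b) :
    ((PySem.List.pyRange a (b+1) 1).map (fun i => if m ≤ i then t else 0)).sum
      = t * (b - (if a > m then a else m) + 1) := by
  obtain ⟨n, hn⟩ : ∃ n : Nat, b = a + n := ⟨(b - a).toNat, by omega⟩
  subst hn
  exact contrib_aux t m n a (by omega)

-- main exchange: the B-loop from state (t, m) equals the sum over the range of Hfun
theorem main_exchange (k a b : Int) (hK : 1 ≤ k ∨ k ≤ -2) (hab : a ≤ b) :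
    ∀ (N : Nat), ∀ (t m c : Int) (f : Nat), 1 ≤ m → (t = m ∨ (k ≤ -2 ∧ t = m*k+1)) →
      ameasure b t m = N → N < f →
      altLoop f t m k a b c
        = c + ((PySem.List.pyRange a (b+1) 1).map (fun i => Hfun k t m i)).sum := by
  intro N
  induction N using Nat.strong_induction_on with
  | _ N ih =>
      intro t m c f hm hd hN hf
      obtain ⟨f', rfl⟩ : ∃ f', f = f' + 1 := ⟨f - 1, by omega⟩
      by_cases hmb : m ≤ b
      · simp only [altLoop, if_pos hmb]
        have hms := step_measure k t m b hK hm hd hmb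
        obtain ⟨hm1, hd1, _⟩ := step_inv k t m hK hm hd
        rw [ih (ameasure b (t*k+1) (if t*k+1 > m then t*k+1 else m)) (by omega)
              (t*k+1) _ _ f' hm1 hd1 rfl (by omega)]
        have hpt : ∀ i ∈ PySem.List.pyRange a (b+1) 1,
            Hfun k t m i
              = (fun i => (if m ≤ i then t else 0)
                  + Hfun k (t*k+1) (if t*k+1 > m then t*k+1 else m) i) i := by
          intro i _; exact Hfun_peel k t m i hK hm hd
        rw [List.map_congr_left hpt, PySem.List.sum_map_add_int,
            contrib_sum t m a b hab hmb]
        ring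
      · push_neg at hmb
        have hz : ∀ i ∈ PySem.List.pyRange a (b+1) 1,
            Hfun k t m i = (fun _ => (0:Int)) i := by
          intro i hi
          rw [PySem.List.mem_pyRange_one] at hi
          simp only [Hfun]
          rw [if_neg (by omega)]
        rw [List.map_congr_left hz]
        simp [altLoop, not_le.mpr hmb]

-- ===== VERDICT (by name: the statement is the Claim_ definition above) =====
theorem simplestSum_spec : Claim_equal_simplestSum := by
  intro k a b _ hpre
  unfold Spec_simplestSum simplestSum simplestSum_alt
  rw [PySem.List.foldl_add]
  by_cases hab : a ≤ b
  · rw [if_pos hab]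
    rcases hpre with hK | hb | hba
    · -- terminating chain: exchange the two summations
      rw [main_exchange k a b hK hab (ameasure b 1 1) 1 1 0 (2*b.toNat+3) le_rfl
            (Or.inl rfl) rfl (by simp [ameasure])]
      congr 2
      refine congrArg List.sum (List.map_congr_left ?_)
      intro i hi
      rw [PySem.List.mem_pyRange_one] at hi
      by_cases h1 : (1:Int) ≤ i
      · rw [innerLoop_fuel k i hK (imeasure k i 1) 1 0 (2*i.toNat+3)
              (imeasure k i 1 + 1) (Or.inl le_rfl) rfl
              (by simp [imeasure]) (by omega)]
        simp only [Hfun, if_pos h1]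
        rfl
      · rw [innerLoop_stop _ _ _ _ _ (by omega)]
        simp only [Hfun, if_neg h1]
    · -- b ≤ 0: the range contains no i ≥ 1, both sides are 0
      have hz : ∀ i ∈ PySem.List.pyRange a (b+1) 1,
          innerLoop (2*i.toNat+3) 1 k i 0 = (fun _ => (0:Int)) i := by
        intro i hi
        rw [PySem.List.mem_pyRange_one] at hi
        exact innerLoop_stop _ _ _ _ _ (by omega)
      rw [List.map_congr_left hz]
      have hfe : 2*b.toNat+3 = (2*b.toNat+2)+1 := rfl
      rw [hfe]
      simp [altLoop, show ¬ (1:Int) ≤ b by omega]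
    · omega
  · rw [if_neg hab, PySem.List.pyRange_one_eq_nil (by omega)]
    simp
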